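-- pv_equiv track=rewrite | github.com/KDragonic/csv-to-JSON-converter-with-nesting | index.py | create_default_template
-- ===== SOURCE A (Python) =====
-- def create_all_keys(data):
--     result = []
--     for item in data:
--         for key in item.keys():
--             if key not in result:
--                 result.append(key)
--     return result
--
-- def create_default_template(data):
--     result = {}
--     for item in create_all_keys(data):
--         if "--" in item:
--             key, value = item.split("--")
--             if key not in result:
--                 result[key] = {}
--         else:
--             result[item] = None
--
--     return result
-- ===== SOURCE B (Python) =====
-- def create_default_template(data):
--     result = {}
--     for item in data:
--         for key in item:
--             if "--" in key:
--                 prefix, _ = key.split("--")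
--                 if prefix not in result:
--                     result[prefix] = {}
--             else:
--                 result[key] = None
--     return result
-- ===== Notes on version B (the rewrite author's own statement) =====
-- stated objective: faster
-- what changed: Single pass writing the result dict directly while scanning each item's keys, dropping the create_all_keys helper and its quadratic 'key not in list' dedup scan; the guarded/idempotent dict writes make the intermediate ordered key list unnecessary.
import Mathlib
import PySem

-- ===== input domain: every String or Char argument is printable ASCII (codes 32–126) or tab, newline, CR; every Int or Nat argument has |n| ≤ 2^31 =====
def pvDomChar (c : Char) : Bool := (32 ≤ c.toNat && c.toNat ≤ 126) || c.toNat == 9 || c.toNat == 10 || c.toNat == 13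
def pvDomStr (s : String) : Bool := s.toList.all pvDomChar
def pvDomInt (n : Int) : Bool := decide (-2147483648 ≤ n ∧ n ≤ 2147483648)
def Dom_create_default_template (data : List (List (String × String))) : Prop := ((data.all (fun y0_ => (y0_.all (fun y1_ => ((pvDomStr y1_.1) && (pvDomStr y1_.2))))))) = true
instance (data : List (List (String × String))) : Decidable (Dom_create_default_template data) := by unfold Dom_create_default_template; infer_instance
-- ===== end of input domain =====

-- B fuses A's two phases into one pass writing the result dict directly, removing the quadratic 'key not in list' dedup scan (objective: faster, measured).

-- ===== PORT A =====
-- item.keys() iterates the distinct keys of the dict `item` in first-insertion order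
-- = PySem.List.dedup (item.map Prod.fst); exact for the association-list encoding of a dict.
def create_all_keys (data : List (List (String × String))) : List String :=
  data.foldl
    (fun result item =>
      (PySem.List.dedup (item.map Prod.fst)).foldl
        (fun result key => if result.contains key then result else result ++ [key]) result)
    []

def create_default_template (data : List (List (String × String))) :
    List (String × Option (List (String × String))) :=
  ((create_all_keys data).foldl
    (fun result it =>
      if PySem.Str.isIn "--" it then
        match PySem.Str.split? it "--" with
        | some [key, _value] =>
            if result.contains key then result else result.insert key (some [])
        | _ => result   -- Python raises ValueError here (split not into 2 parts); excluded by Pre_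
      else result.insert it none)
    (PySem.Dict.empty)).items

-- ===== PORT B =====
def create_default_template_alt (data : List (List (String × String))) :
    List (String × Option (List (String × String))) :=
  (data.foldl
    (fun result item =>
      (PySem.List.dedup (item.map Prod.fst)).foldl
        (fun result key =>
          if PySem.Str.isIn "--" key then
            -- `prefix, _ = key.split("--")`: unpack succeeds iff the split has exactly 2 parts
            let parts := (PySem.Str.split? key "--").getD []
            if parts.length = 2 then
              let pre := parts.headD ""
              if result.contains pre then result else result.insert pre (some [])
            else result   -- Python raises ValueError here; excluded by Pre_
          else result.insert key none)
        result)
    (PySem.Dict.empty)).items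

-- ===== PRECONDITION & SPEC =====
-- Pre_ excludes exactly the inputs containing a key with two or more occurrences of "--",
-- on which Python's `key, value = key.split("--")` raises ValueError (in A and in B alike).
def Pre_create_default_template (data : List (List (String × String))) : Prop :=
  ∀ item ∈ data, ∀ kv ∈ item, ((PySem.Str.split? kv.1 "--").getD []).length ≤ 2

instance (data : List (List (String × String))) : Decidable (Pre_create_default_template data) := by
  unfold Pre_create_default_template; infer_instance

def pvWitness_create_default_template : (List (List (String × String))) :=
  [[("a--b", "1"), ("c", "2")], [("c", "3"), ("a", "4")]]

def Spec_create_default_template (data : List (List (String × String))) (out : List (String × Option (List (String × String)))) : Prop := out = create_default_template_alt data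
instance (data : List (List (String × String))) (out : List (String × Option (List (String × String)))) : Decidable (Spec_create_default_template data out) := by unfold Spec_create_default_template; infer_instance

-- ===== CLAIM (what is proved, stated in full; the proofs are below) =====
def Claim_equal_create_default_template : Prop := ∀ (data : List (List (String × String))), Dom_create_default_template data → Pre_create_default_template data → Spec_create_default_template data (create_default_template data)

-- ===== LEMMAS AND PROOFS =====

-- the per-key action both ports perform, abbreviated for the proofs
def pvStep (r : PySem.Dict String (Option (List (String × String)))) (s : String) :
    PySem.Dict String (Option (List (String × String))) :=
  if PySem.Str.isIn "--" s then
    match PySem.Str.split? s "--" with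
    | some [key, _value] => if r.contains key then r else r.insert key (some [])
    | _ => r
  else r.insert s none

-- the per-key action of port B, as written in create_default_template_alt
def pvStepB (r : PySem.Dict String (Option (List (String × String)))) (s : String) :
    PySem.Dict String (Option (List (String × String))) :=
  if PySem.Str.isIn "--" s then
    let parts := (PySem.Str.split? s "--").getD []
    if parts.length = 2 then
      let pre := parts.headD ""
      if r.contains pre then r else r.insert pre (some [])
    else r
  else r.insert s none

-- the flat stream of keys both programs traverse, in order
def pvFlat (data : List (List (String × String))) : List String :=
  data.flatMap (fun item => PySem.List.dedup (item.map Prod.fst))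

-- keys of the dedup fold of A that are NEW relative to accumulator `acc`
def pvNew (acc : List String) : List String → List String
  | [] => []
  | a :: l => if acc.contains a then pvNew acc l else a :: pvNew (acc ++ [a]) l

-- what processing key s guarantees about the result dict
def pvFact (r : PySem.Dict String (Option (List (String × String)))) (s : String) : Prop :=
  if PySem.Str.isIn "--" s = true then
    match PySem.Str.split? s "--" with
    | some [key, _value] => r.contains key = true
    | _ => True
  else r.get? s = some none

def pvInv (seen : List String) (r : PySem.Dict String (Option (List (String × String)))) : Prop :=
  r.keys.Nodup ∧ ∀ s ∈ seen, pvFact r s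

theorem pv_dd_eq_append (l acc : List String) :
    l.foldl (fun result key => if result.contains key then result else result ++ [key]) acc
      = acc ++ pvNew acc l := by
  induction l generalizing acc with
  | nil => simp [pvNew]
  | cons a l ih =>
      simp only [List.foldl_cons, pvNew]
      by_cases h : acc.contains a = true
      · rw [if_pos h, if_pos h, ih]
      · rw [if_neg h, if_neg h, ih (acc ++ [a])]
        simp

theorem pv_map_if_eq_self {κ ν : Type} [BEq κ] [LawfulBEq κ]
    (k : κ) (v : ν) : ∀ (xs : List (κ × ν)), (xs.map Prod.fst).Nodup →
    (PySem.Dict.mk xs).get? k = some v →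
    xs.map (fun p => if p.1 == k then (k, v) else p) = xs := by
  intro xs
  induction xs with
  | nil => intro _ h; simp [PySem.Dict.get?] at h
  | cons a rest ih =>
      obtain ⟨a1, a2⟩ := a
      intro hn hg
      rw [PySem.Dict.get?_mk_cons] at hg
      simp only [List.map_cons] at hn
      obtain ⟨hna, hnr⟩ := List.nodup_cons.1 hn
      simp only [List.map_cons]
      by_cases hk : (a1 == k) = true
      · have hak : a1 = k := eq_of_beq hk
        rw [if_pos hk] at hg
        have hv : a2 = v := by simpa using hg
        have hrest : rest.map (fun p => if p.1 == k then (k, v) else p) = rest := by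
          refine (List.map_congr_left ?_).trans (List.map_id rest)
          intro p hp
          have hne : p.1 ≠ k := by
            intro he
            have : p.1 ∈ List.map Prod.fst rest := List.mem_map_of_mem hp
            rw [he, ← hak] at this
            exact hna this
          simp [hne]
        simp [hak, hv, hrest]
      · have hak : ¬ a1 = k := fun he => hk (beq_iff_eq.2 he)
        rw [if_neg hk] at hg
        have hrest := ih hnr hg
        simp [hk, hrest]

theorem pv_insert_self {κ ν : Type} [BEq κ] [LawfulBEq κ]
    (d : PySem.Dict κ ν) (k : κ) (v : ν) (hn : d.keys.Nodup) (h : d.get? k = some v) :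
    d.insert k v = d := by
  have hc : d.contains k = true := by
    by_contra hc
    have : d.get? k = none := (PySem.Dict.get?_eq_none_iff_contains d k).2 (by simpa using hc)
    simp [this] at h
  apply PySem.Dict.ext
  rw [PySem.Dict.items_insert_of_contains d v hc]
  exact pv_map_if_eq_self k v d.items (by simpa [PySem.Dict.keys] using hn) (by cases d; exact h)

theorem pv_step_contains (r : PySem.Dict String (Option (List (String × String))))
    (s k : String) (h : r.contains k = true) : (pvStep r s).contains k = true := by
  unfold pvStep
  split
  · split
    · split
      · exact h
      · simp [PySem.Dict.contains_insert, h]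
    · exact h
  · simp [PySem.Dict.contains_insert, h]

theorem pv_step_get_none (r : PySem.Dict String (Option (List (String × String))))
    (s t : String) (h : r.get? t = some none) : (pvStep r s).get? t = some none := by
  have hct : r.contains t = true := by
    by_contra hc
    have : r.get? t = none := (PySem.Dict.get?_eq_none_iff_contains r t).2 (by simpa using hc)
    simp [this] at h
  unfold pvStep
  split
  · split
    next key _value heq =>
      split
      · exact h
      next hkc =>
        have hne : t ≠ key := by intro he; rw [he] at hct; simp [hct] at hkc
        rw [PySem.Dict.get?_insert_of_ne _ _ hne]; exact h
    · exact h
  · rw [PySem.Dict.get?_insert]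
    split
    next he => simp
    next he => exact h

theorem pv_step_nodup (r : PySem.Dict String (Option (List (String × String))))
    (s : String) (hn : r.keys.Nodup) : (pvStep r s).keys.Nodup := by
  unfold pvStep
  split
  · split
    · split
      · exact hn
      · exact PySem.Dict.nodup_keys_insert _ _ _ hn
    · exact hn
  · exact PySem.Dict.nodup_keys_insert _ _ _ hn

theorem pv_fact_step (r : PySem.Dict String (Option (List (String × String))))
    (s t : String) (h : pvFact r t) : pvFact (pvStep r s) t := by
  unfold pvFact at h ⊢
  by_cases hin : PySem.Str.isIn "--" t = true
  · rw [if_pos hin] at h ⊢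
    cases hsp : PySem.Str.split? t "--" with
    | none => trivial
    | some parts =>
        rw [hsp] at h
        match parts with
        | [] => trivial
        | [_] => trivial
        | [key, _value] => exact pv_step_contains r s key h
        | _ :: _ :: _ :: _ => trivial
  · rw [if_neg hin] at h ⊢
    exact pv_step_get_none r s t h

theorem pv_fact_self (r : PySem.Dict String (Option (List (String × String))))
    (s : String) : pvFact (pvStep r s) s := by
  unfold pvFact pvStep
  by_cases hin : PySem.Str.isIn "--" s = true
  · simp only [hin, if_pos]
    cases hsp : PySem.Str.split? s "--" with
    | none => trivial
    | some parts =>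
        match parts with
        | [] => trivial
        | [_] => trivial
        | [key, _value] =>
            by_cases hc : r.contains key = true
            · simp [hc]
            · simp [hc]
        | _ :: _ :: _ :: _ => trivial
  · simp only [hin]
    simp [PySem.Dict.get?_insert_self]

theorem pv_step_noop (r : PySem.Dict String (Option (List (String × String))))
    (s : String) (hn : r.keys.Nodup) (h : pvFact r s) : pvStep r s = r := by
  unfold pvFact at h
  unfold pvStep
  by_cases hin : PySem.Str.isIn "--" s = true
  · rw [if_pos hin] at h ⊢
    cases hsp : PySem.Str.split? s "--" with
    | none => rfl
    | some parts =>
        rw [hsp] at h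
        match parts with
        | [] => rfl
        | [_] => rfl
        | [key, _value] =>
            have h' : r.contains key = true := h
            show (if r.contains key = true then r else r.insert key (some [])) = r
            rw [if_pos h']
        | _ :: _ :: _ :: _ => rfl
  · rw [if_neg hin] at h ⊢
    exact pv_insert_self r s none hn h

theorem pv_main (l : List String) : ∀ (acc : List String)
    (r : PySem.Dict String (Option (List (String × String)))), pvInv acc r →
    (pvNew acc l).foldl pvStep r = l.foldl pvStep r := by
  induction l with
  | nil => intro acc r _; rfl
  | cons a l ih =>
      intro acc r hInv
      unfold pvNew
      by_cases hc : acc.contains a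
      · have ha : a ∈ acc := by simpa using hc
        have hstep : pvStep r a = r := pv_step_noop r a hInv.1 (hInv.2 a ha)
        simp only [hc, if_true, List.foldl_cons, hstep]
        exact ih acc r hInv
      · simp only [hc, List.foldl_cons]
        apply ih (acc ++ [a]) (pvStep r a)
        constructor
        · exact pv_step_nodup r a hInv.1
        · intro s hs
          rcases List.mem_append.1 hs with hs | hs
          · exact pv_fact_step r a s (hInv.2 s hs)
          · have : s = a := by simpa using hs
            subst this
            exact pv_fact_self r s

theorem pv_A_eq (data : List (List (String × String))) :
    create_default_template data = ((pvNew [] (pvFlat data)).foldl pvStep PySem.Dict.empty).items := by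
  have h1 : create_all_keys data = pvNew [] (pvFlat data) := by
    unfold create_all_keys pvFlat
    rw [← List.foldl_flatMap]
    simpa using pv_dd_eq_append (data.flatMap (fun item => PySem.List.dedup (item.map Prod.fst))) []
  unfold create_default_template
  rw [h1]
  rfl

theorem pv_stepB_eq_step (r : PySem.Dict String (Option (List (String × String))))
    (s : String) : pvStepB r s = pvStep r s := by
  unfold pvStepB pvStep
  by_cases hin : PySem.Str.isIn "--" s = true
  · rw [if_pos hin, if_pos hin]
    cases hsp : PySem.Str.split? s "--" with
    | none => rfl
    | some parts =>
        match parts with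
        | [] => rfl
        | [_] => rfl
        | [_, _] => rfl
        | _ :: _ :: _ :: _ => rfl
  · rw [if_neg hin, if_neg hin]

theorem pv_B_eq (data : List (List (String × String))) :
    create_default_template_alt data = ((pvFlat data).foldl pvStep PySem.Dict.empty).items := by
  have hfe : pvStepB = pvStep := funext fun r => funext fun s => pv_stepB_eq_step r s
  unfold create_default_template_alt pvFlat
  rw [← List.foldl_flatMap]
  show ((List.foldl pvStepB _ _).items) = _
  rw [hfe]

-- ===== VERDICT (by name: the statement is the Claim_ definition above) =====
theorem create_default_template_spec : Claim_equal_create_default_template := by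
  intro data _hDom _hPre
  unfold Spec_create_default_template
  rw [pv_A_eq, pv_B_eq]
  congr 1
  exact pv_main (pvFlat data) [] PySem.Dict.empty ⟨PySem.Dict.nodup_keys_empty, by simp⟩
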